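-- pv_equiv track=rewrite | github.com/kismatkunwar89/threat-intelligence-platform | utils/normalizer.py | _extract_threat_types
-- ===== SOURCE A (Python) =====
-- from typing import Dict, Any, List, Optional
--
-- def _extract_threat_types(general: Dict[str, Any]) -> List[str]:
--     """
--     Extract threat types from OTX pulse data.
--
--     Uses nested comprehensions to flatten pulse data.
--
--     Args:
--         general: OTX general data
--
--     Returns:
--         list: Unique threat types
--     """
--     pulse_info = general.get('pulse_info', {})
--     pulses = pulse_info.get('pulses', [])
--
--     if not pulses:
--         return []
--
--     # Use set comprehension with nested iteration
--     threat_tags = {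
--         tag
--         for pulse in pulses
--         for tag in pulse.get('tags', [])
--     }
--
--     return sorted(list(threat_tags))
-- ===== SOURCE B (Python) =====
-- def _insert_tag(acc, tag):
--     """Insert tag into the sorted duplicate-free list acc, keeping it sorted
--     and duplicate-free (returns acc unchanged if tag is already present)."""
--     out = []
--     rest = acc
--     while rest and rest[0] < tag:
--         out.append(rest[0])
--         rest = rest[1:]
--     if rest and rest[0] == tag:
--         return acc
--     return out + [tag] + rest
--
--
-- def _extract_threat_types(general):
--     """Stream over pulses and tags, maintaining a sorted duplicate-free
--     accumulator by ordered insertion (no set, no final sort)."""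
--     acc = []
--     for pulse in general.get('pulse_info', {}).get('pulses', []):
--         for tag in pulse.get('tags', []):
--             acc = _insert_tag(acc, tag)
--     return acc
-- ===== Notes on version B (the rewrite author's own statement) =====
-- stated objective: alternative
-- what changed: B streams over pulses and tags maintaining a sorted duplicate-free accumulator by ordered insertion, instead of A's set comprehension followed by a final sort.
import Mathlib
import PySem

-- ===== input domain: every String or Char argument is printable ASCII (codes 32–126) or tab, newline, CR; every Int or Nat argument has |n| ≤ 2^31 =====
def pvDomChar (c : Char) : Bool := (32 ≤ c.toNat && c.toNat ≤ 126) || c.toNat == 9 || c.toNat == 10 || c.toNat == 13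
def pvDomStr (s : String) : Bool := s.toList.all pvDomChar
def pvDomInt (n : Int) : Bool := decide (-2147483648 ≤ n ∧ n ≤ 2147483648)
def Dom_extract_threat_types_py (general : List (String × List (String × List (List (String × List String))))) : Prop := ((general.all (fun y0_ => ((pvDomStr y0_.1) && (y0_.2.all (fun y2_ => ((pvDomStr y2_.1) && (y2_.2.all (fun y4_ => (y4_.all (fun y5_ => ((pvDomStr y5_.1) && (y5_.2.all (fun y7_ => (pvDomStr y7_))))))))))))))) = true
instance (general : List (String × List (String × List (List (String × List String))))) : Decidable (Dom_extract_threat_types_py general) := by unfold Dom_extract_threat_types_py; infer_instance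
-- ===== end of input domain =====

-- B streams over pulses/tags maintaining a sorted duplicate-free accumulator by
-- ordered insertion, instead of A's set comprehension + final sort; objective: alternative.

-- ===== PORT A =====
def extract_threat_types_py (general : List (String × List (String × List (List (String × List String))))) : List String :=
  let pulse_info := (PySem.Dict.ofList general).getD "pulse_info" []
  let pulses := (PySem.Dict.ofList pulse_info).getD "pulses" []
  if pulses = [] then []
  else
    let threat_tags : PySem.Set String :=
      PySem.Set.ofList (pulses.flatMap (fun pulse => (PySem.Dict.ofList pulse).getD "tags" []))
    PySem.List.sorted threat_tags (fun x => x) false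

-- ===== PORT B =====
-- Source B's while loop scanning for the insertion point, as structural recursion on
-- the remaining suffix with the scanned prefix accumulated in `out` (appended reversed).
def insTagGo (acc : List String) (tag : String) (out rest : List String) : List String :=
  match rest with
  | [] => out.reverse ++ [tag]
  | h :: t =>
    if h < tag then insTagGo acc tag (h :: out) t
    else if h = tag then acc
    else out.reverse ++ tag :: h :: t

def insTag (acc : List String) (tag : String) : List String :=
  insTagGo acc tag [] acc

def extract_threat_types_py_alt (general : List (String × List (String × List (List (String × List String))))) : List String :=
  let pulses := (PySem.Dict.ofList ((PySem.Dict.ofList general).getD "pulse_info" [])).getD "pulses" []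
  pulses.foldl (fun acc pulse =>
    ((PySem.Dict.ofList pulse).getD "tags" []).foldl insTag acc) []

-- ===== PRECONDITION & SPEC =====
def Spec_extract_threat_types_py (general : List (String × List (String × List (List (String × List String))))) (out : List String) : Prop := out = extract_threat_types_py_alt general
instance (general : List (String × List (String × List (List (String × List String))))) (out : List String) : Decidable (Spec_extract_threat_types_py general out) := by unfold Spec_extract_threat_types_py; infer_instance

-- ===== CLAIM (what is proved, stated in full; the proofs are below) =====
def Claim_equal_extract_threat_types_py : Prop := ∀ (general : List (String × List (String × List (List (String × List String))))), Dom_extract_threat_types_py general → Spec_extract_threat_types_py general (extract_threat_types_py general)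

-- ===== LEMMAS AND PROOFS =====

-- the same insertion, without the prefix accumulator (proof vehicle)
def ins : List String → String → List String
  | [], tag => [tag]
  | h :: t, tag => if h < tag then h :: ins t tag else if h = tag then h :: t else tag :: h :: t

lemma insTagGo_eq (tag : String) (rest : List String) :
    ∀ out acc, acc = out.reverse ++ rest → insTagGo acc tag out rest = out.reverse ++ ins rest tag := by
  induction rest with
  | nil => intro out acc h; simp [insTagGo, ins]
  | cons h t ih =>
    intro out acc hacc
    simp only [insTagGo, ins]
    by_cases h1 : h < tag
    · rw [if_pos h1, if_pos h1, ih (h :: out) acc (by simpa using hacc)]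
      simp
    · rw [if_neg h1, if_neg h1]
      by_cases h2 : h = tag
      · rw [if_pos h2, if_pos h2, hacc]
      · rw [if_neg h2, if_neg h2]

lemma insTag_eq_ins (acc : List String) (tag : String) : insTag acc tag = ins acc tag := by
  simpa using insTagGo_eq tag acc [] acc (by simp)

lemma ins_spec (tag : String) (l : List String) (hl : l.Pairwise (· < ·)) :
    (ins l tag).Pairwise (· < ·) ∧ ∀ a, a ∈ ins l tag ↔ a ∈ l ∨ a = tag := by
  induction l with
  | nil => simp [ins]
  | cons h t ih =>
    rcases List.pairwise_cons.mp hl with ⟨hlt, ht⟩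
    obtain ⟨ihpw, ihmem⟩ := ih ht
    simp only [ins]
    by_cases h1 : h < tag
    · rw [if_pos h1]
      refine ⟨List.pairwise_cons.mpr ⟨?_, ihpw⟩, ?_⟩
      · intro y hy
        rcases (ihmem y).mp hy with hy' | rfl
        · exact hlt y hy'
        · exact h1
      · intro a; rw [List.mem_cons, List.mem_cons, ihmem a]; tauto
    · rw [if_neg h1]
      by_cases h2 : h = tag
      · rw [if_pos h2]
        refine ⟨hl, ?_⟩
        intro a; subst h2
        simp only [List.mem_cons]; tauto
      · rw [if_neg h2]
        have h3 : tag < h := lt_of_le_of_ne (le_of_not_gt h1) (Ne.symm h2)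
        refine ⟨List.pairwise_cons.mpr ⟨?_, hl⟩, ?_⟩
        · intro y hy
          rcases List.mem_cons.mp hy with rfl | hy'
          · exact h3
          · exact lt_trans h3 (hlt y hy')
        · intro a; simp only [List.mem_cons]; tauto

lemma foldl_insTag_spec (tags : List String) :
    ∀ acc : List String, acc.Pairwise (· < ·) →
      (tags.foldl insTag acc).Pairwise (· < ·) ∧
      ∀ a, a ∈ tags.foldl insTag acc ↔ a ∈ acc ∨ a ∈ tags := by
  induction tags with
  | nil =>
    intro acc h
    refine ⟨by simpa using h, fun a => by simp⟩
  | cons tg rest ih =>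
    intro acc h
    rw [List.foldl_cons, insTag_eq_ins]
    obtain ⟨hpw, hmem⟩ := ins_spec tg acc h
    obtain ⟨ihpw, ihmem⟩ := ih (ins acc tg) hpw
    refine ⟨ihpw, ?_⟩
    intro a
    rw [ihmem a, hmem a, List.mem_cons]
    tauto

lemma foldl_pulses_spec (pulses : List (List (String × List String))) :
    ∀ acc : List String, acc.Pairwise (· < ·) →
      (pulses.foldl (fun acc pulse => ((PySem.Dict.ofList pulse).getD "tags" []).foldl insTag acc) acc).Pairwise (· < ·) ∧
      ∀ a, a ∈ pulses.foldl (fun acc pulse => ((PySem.Dict.ofList pulse).getD "tags" []).foldl insTag acc) acc ↔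
        a ∈ acc ∨ a ∈ pulses.flatMap (fun pulse => (PySem.Dict.ofList pulse).getD "tags" []) := by
  induction pulses with
  | nil =>
    intro acc h
    refine ⟨by simpa using h, fun a => by simp⟩
  | cons p rest ih =>
    intro acc h
    rw [List.foldl_cons]
    obtain ⟨hpw, hmem⟩ := foldl_insTag_spec ((PySem.Dict.ofList p).getD "tags" []) acc h
    obtain ⟨ihpw, ihmem⟩ := ih _ hpw
    refine ⟨ihpw, ?_⟩
    intro a
    rw [ihmem a, hmem a, List.flatMap_cons, List.mem_append]
    tauto

-- ===== VERDICT (by name: the statement is the Claim_ definition above) =====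
theorem extract_threat_types_py_spec : Claim_equal_extract_threat_types_py := by
  intro general _
  unfold Spec_extract_threat_types_py extract_threat_types_py extract_threat_types_py_alt
  dsimp only
  set pulses := (PySem.Dict.ofList ((PySem.Dict.ofList general).getD "pulse_info" [])).getD "pulses" [] with hp
  obtain ⟨hpw, hmem⟩ := foldl_pulses_spec pulses [] (by simp)
  by_cases hnil : pulses = []
  · rw [if_pos hnil, hnil]; simp
  · rw [if_neg hnil]
    set flat := pulses.flatMap (fun pulse => (PySem.Dict.ofList pulse).getD "tags" []) with hf
    apply PySem.List.sorted_eq_of_perm_of_pairwise_lt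
    · refine (List.perm_ext_iff_of_nodup ?_ ?_).mpr ?_
      · exact hpw.imp (fun h => ne_of_lt h)
      · exact PySem.Set.nodup_ofList flat
      · intro a
        rw [hmem a, PySem.Set.mem_ofList]
        simp
    · exact hpw
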